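-- pv_equiv track=rewrite | github.com/sirosen/globus-sdk-python | src/globus_sdk/scopes/_parser.py | _peek_enumerate
-- ===== SOURCE A (Python) =====
-- import typing as t
--
-- def _peek_enumerate(data: str | list[str]) -> t.Iterator[tuple[int, str, str | None]]:
--     """
--     An iterator producing (index, character, next_char)
--     or else producing (index, str, next_str)
--
--     (Depending on whether or not the input is a string or list of strings)
--     """
--     if not data:
--         return
--
--     prev: str = data[0]
--     for idx, c in enumerate(data[1:]):
--         yield (idx, prev, c)
--         prev = c
--
--     yield (len(data) - 1, prev, None)
-- ===== SOURCE B (Python) =====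
-- def _peek_enumerate(data):
--     """
--     An iterator producing (index, character, next_char)
--     or else producing (index, str, next_str)
--     """
--     nexts = list(data[1:]) + [None]
--     for idx, (cur, nxt) in enumerate(zip(data, nexts)):
--         yield (idx, cur, nxt)
-- ===== Notes on version B (the rewrite author's own statement) =====
-- stated objective: idiomatic
-- what changed: Staged pipeline instead of a stateful scan: first materialize the shifted successor list data[1:] + [None], then zip it with data and enumerate the pairs, so there is no prev accumulator, no index lookahead and no separate boundary yield.
import Mathlib
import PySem

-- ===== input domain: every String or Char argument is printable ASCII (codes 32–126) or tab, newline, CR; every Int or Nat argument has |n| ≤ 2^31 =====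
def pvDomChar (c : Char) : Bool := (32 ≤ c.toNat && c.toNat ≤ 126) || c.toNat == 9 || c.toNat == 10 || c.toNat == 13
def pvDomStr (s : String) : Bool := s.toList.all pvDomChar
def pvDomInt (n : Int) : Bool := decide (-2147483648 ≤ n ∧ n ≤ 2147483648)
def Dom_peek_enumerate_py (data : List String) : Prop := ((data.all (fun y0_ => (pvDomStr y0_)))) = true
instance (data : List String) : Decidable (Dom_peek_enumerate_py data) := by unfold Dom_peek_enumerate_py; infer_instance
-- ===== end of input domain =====

-- B replaces A's stateful prev-accumulator scan (with its trailing boundary yield) by a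
-- staged pipeline: materialize the successor list data[1:] + [None], zip it with data,
-- and enumerate the pairs; objective: idiomatic.

-- ===== PORT A =====
-- the generator's for-loop: state is (idx, prev); returns (yields so far, final prev)
def pvALoop (idx : Nat) (prev : String) : List String → (List (Int × String × Option String) × String)
  | [] => ([], prev)
  | c :: rest =>
    let r := pvALoop (idx + 1) c rest
    (((idx : Int), prev, some c) :: r.1, r.2)

def peek_enumerate_py (data : List String) : List (Int × String × Option String) :=
  match data with
  | [] => []
  | d0 :: rest =>
    let r := pvALoop 0 d0 rest
    r.1 ++ [((data.length : Int) - 1, r.2, none)]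

-- ===== PORT B =====
-- nexts = list(data[1:]) + [None]; then enumerate(zip(data, nexts))
def peek_enumerate_py_alt (data : List String) : List (Int × String × Option String) :=
  let nexts : List (Option String) := (data.drop 1).map some ++ [none]
  (PySem.List.enumerate (data.zip nexts)).map (fun p => (p.1, p.2.1, p.2.2))

-- ===== PRECONDITION & SPEC =====
def Spec_peek_enumerate_py (data : List String) (out : List (Int × String × Option String)) : Prop := out = peek_enumerate_py_alt data
instance (data : List String) (out : List (Int × String × Option String)) : Decidable (Spec_peek_enumerate_py data out) := by unfold Spec_peek_enumerate_py; infer_instance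

-- ===== CLAIM (what is proved, stated in full; the proofs are below) =====
def Claim_equal_peek_enumerate_py : Prop := ∀ (data : List String), Dom_peek_enumerate_py data → Spec_peek_enumerate_py data (peek_enumerate_py data)

-- ===== LEMMAS AND PROOFS =====

def pvShift (p : Int × String × Option String) : Int × String × Option String :=
  (p.1 + 1, p.2)

theorem pvALoop_shift (l : List String) : ∀ (idx : Nat) (prev : String),
    pvALoop (idx + 1) prev l = (((pvALoop idx prev l).1).map pvShift, (pvALoop idx prev l).2) := by
  induction l with
  | nil => intro idx prev; simp [pvALoop]
  | cons c rest ih =>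
    intro idx prev
    simp only [pvALoop, ih (idx + 1) c, List.map_cons]
    simp [pvShift]

theorem peek_cons (x : String) (xs : List String) :
    peek_enumerate_py (x :: xs) =
      ((0 : Int), x, xs.head?) :: (peek_enumerate_py xs).map pvShift := by
  cases xs with
  | nil => simp [peek_enumerate_py, pvALoop]
  | cons y rest =>
    simp only [peek_enumerate_py, pvALoop, List.head?]
    rw [pvALoop_shift rest 0 y]
    simp [pvShift]

theorem enum_shift {α : Type} (l : List α) : ∀ (s : Int),
    PySem.List.enumerate l (s + 1) =
      (PySem.List.enumerate l s).map (fun p => (p.1 + 1, p.2)) := by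
  induction l with
  | nil => intro s; simp [PySem.List.enumerate_nil]
  | cons a rest ih =>
    intro s
    rw [PySem.List.enumerate_cons, PySem.List.enumerate_cons, List.map_cons,
      show s + 1 + 1 = (s + 1) + 1 from rfl, ih (s + 1)]

theorem alt_cons (x : String) (xs : List String) :
    peek_enumerate_py_alt (x :: xs) =
      ((0 : Int), x, xs.head?) :: (peek_enumerate_py_alt xs).map pvShift := by
  cases xs with
  | nil => simp [peek_enumerate_py_alt, PySem.List.enumerate_cons, PySem.List.enumerate_nil]
  | cons y rest =>
    simp only [peek_enumerate_py_alt, List.drop_one, List.tail_cons, List.map_cons,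
      List.cons_append, List.zip_cons_cons, PySem.List.enumerate_cons, List.head?,
      zero_add]
    rw [show (1:Int) = 0 + 1 from rfl, enum_shift, List.map_map, List.map_map]
    simp [Function.comp, pvShift]

-- ===== VERDICT (by name: the statement is the Claim_ definition above) =====
theorem peek_eq_alt (data : List String) : peek_enumerate_py data = peek_enumerate_py_alt data := by
  induction data with
  | nil => simp [peek_enumerate_py, peek_enumerate_py_alt, PySem.List.enumerate_nil]
  | cons x xs ih => rw [peek_cons, alt_cons, ih]

theorem peek_enumerate_py_spec : Claim_equal_peek_enumerate_py := by
  intro data _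
  exact peek_eq_alt data
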